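-- pv_equiv track=rewrite | github.com/theXYZT/codejam-2018 | Round 2/falling-balls.py | iterate_layout
-- ===== SOURCE A (Python) =====
-- def iterate_layout(start, result):
--     """Returns next row of layout."""
--     row = '.'
--     for i in range(1, len(result) - 1):
--         if sum(result[:i]) > sum(start[:i]):
--             row += '/'
--             start[i] -= 1
--             start[i - 1] += 1
--         elif sum(result[i + 1:]) > sum(start[i + 1:]):
--             row += "\\"
--             start[i] -= 1
--             start[i + 1] += 1
--         else:
--             row += '.'
--     return row + '.'
-- ===== SOURCE B (Python) =====
-- def iterate_layout(start, result):
--     """Returns next row of layout.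
--
--     One pass with running prefix/suffix sums (kept consistent with the
--     in-place mutations of start) instead of re-summing slices at every i.
--     """
--     n = len(result)
--     row = '.'
--     if n >= 3:
--         rp, sp = result[0], start[0]
--         rs, ss = sum(result[2:]), sum(start[2:])
--         for i in range(1, n - 1):
--             if rp > sp:
--                 row += '/'
--                 start[i] -= 1
--                 start[i - 1] += 1
--                 sp += 1
--             elif rs > ss:
--                 row += '\\'
--                 start[i] -= 1
--                 start[i + 1] += 1
--                 ss += 1
--             else:
--                 row += '.'
--             rp += result[i]
--             sp += start[i]
--             rs -= result[i + 1]
--             ss -= start[i + 1]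
--     return row + '.'
-- ===== Notes on version B (the rewrite author's own statement) =====
-- stated objective: faster
-- what changed: A recomputes sum(result[:i]), sum(start[:i]), sum(result[i+1:]), sum(start[i+1:]) from scratch at every position; B computes the four sums once and updates them incrementally (accounting for the in-place +-1 mutations of start) in a single O(n) pass.
-- outside the precondition, e.g. on iterate_layout([], [0, 0, 0]): A returns '...', B raises IndexError
import Mathlib
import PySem

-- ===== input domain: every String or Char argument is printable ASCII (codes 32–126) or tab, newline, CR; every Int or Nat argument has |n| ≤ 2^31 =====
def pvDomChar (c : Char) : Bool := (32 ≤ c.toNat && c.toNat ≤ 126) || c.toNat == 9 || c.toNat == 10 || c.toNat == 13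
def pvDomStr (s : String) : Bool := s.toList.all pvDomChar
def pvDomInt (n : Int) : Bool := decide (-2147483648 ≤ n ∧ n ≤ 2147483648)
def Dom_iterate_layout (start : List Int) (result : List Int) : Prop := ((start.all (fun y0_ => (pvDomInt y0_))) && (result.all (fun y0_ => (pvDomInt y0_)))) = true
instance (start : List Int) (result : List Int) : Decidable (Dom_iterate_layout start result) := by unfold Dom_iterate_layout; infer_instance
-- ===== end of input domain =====

-- B replaces A's per-index slice re-summing by four running prefix/suffix sums updated in one pass
-- (both Pythons mutate `start` in place identically; the theorems below are about the return value).


-- ===== PORT A =====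
-- one loop iteration of A: re-sums the four slices from scratch, mutates st, appends the character
def pvStepA (result : List Int) (acc : List Int × String) (i : Int) : List Int × String :=
  let st := acc.1
  if (PySem.List.slice result none (some i)).sum > (PySem.List.slice st none (some i)).sum then
    let st := PySem.List.pySetD st i (PySem.List.pyGetD st i 0 - 1)
    let st := PySem.List.pySetD st (i - 1) (PySem.List.pyGetD st (i - 1) 0 + 1)
    (st, acc.2 ++ "/")
  else if (PySem.List.slice result (some (i + 1)) none).sum > (PySem.List.slice st (some (i + 1)) none).sum then
    let st := PySem.List.pySetD st i (PySem.List.pyGetD st i 0 - 1)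
    let st := PySem.List.pySetD st (i + 1) (PySem.List.pyGetD st (i + 1) 0 + 1)
    (st, acc.2 ++ "\\")
  else
    (st, acc.2 ++ ".")

def iterate_layout (start : List Int) (result : List Int) : String :=
  let p := (PySem.List.pyRange 1 ((result.length : Int) - 1) 1).foldl (pvStepA result) (start, ".")
  p.2 ++ "."

-- ===== PORT B =====
-- one loop iteration of B over the state (st, row, rp, sp, rs, ss): decide from the running sums,
-- mutate st and patch sp/ss for it, then advance all four running sums to the next index
def pvStepB (result : List Int) (acc : List Int × String × Int × Int × Int × Int) (i : Int) :
    List Int × String × Int × Int × Int × Int :=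
  let (st, row, rp, sp, rs, ss) := acc
  let (st, row, sp, ss) :=
    if rp > sp then
      let st := PySem.List.pySetD st i (PySem.List.pyGetD st i 0 - 1)
      let st := PySem.List.pySetD st (i - 1) (PySem.List.pyGetD st (i - 1) 0 + 1)
      (st, row ++ "/", sp + 1, ss)
    else if rs > ss then
      let st := PySem.List.pySetD st i (PySem.List.pyGetD st i 0 - 1)
      let st := PySem.List.pySetD st (i + 1) (PySem.List.pyGetD st (i + 1) 0 + 1)
      (st, row ++ "\\", sp, ss + 1)
    else
      (st, row ++ ".", sp, ss)
  (st, row, rp + PySem.List.pyGetD result i 0, sp + PySem.List.pyGetD st i 0,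
   rs - PySem.List.pyGetD result (i + 1) 0, ss - PySem.List.pyGetD st (i + 1) 0)

def iterate_layout_alt (start : List Int) (result : List Int) : String :=
  let n : Int := (result.length : Int)
  let row := "."
  if 3 ≤ n then
    let s := (PySem.List.pyRange 1 (n - 1) 1).foldl (pvStepB result)
      (start, row, PySem.List.pyGetD result 0 0, PySem.List.pyGetD start 0 0,
       (PySem.List.slice result (some 2) none).sum, (PySem.List.slice start (some 2) none).sum)
    s.2.1 ++ "."
  else
    row ++ "."

-- ===== PRECONDITION & SPEC =====
-- Pre_ requires start to be at least as long as result: otherwise A raises IndexError whenever a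
-- branch fires at an index beyond start (and B reads those same cells unconditionally), while on
-- value-dependent corner cases where no branch happens to fire A still returns (see cites).
def Pre_iterate_layout (start : List Int) (result : List Int) : Prop :=
  result.length ≤ start.length
instance (start : List Int) (result : List Int) : Decidable (Pre_iterate_layout start result) := by
  unfold Pre_iterate_layout; infer_instance

def pvWitness_iterate_layout : List Int × List Int := ([3, 0, 1, 0], [1, 1, 1, 1])

def Spec_iterate_layout (start : List Int) (result : List Int) (out : String) : Prop := out = iterate_layout_alt start result
instance (start : List Int) (result : List Int) (out : String) : Decidable (Spec_iterate_layout start result out) := by unfold Spec_iterate_layout; infer_instance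

-- ===== CLAIM (what is proved, stated in full; the proofs are below) =====
def Claim_equal_iterate_layout : Prop := ∀ (start : List Int) (result : List Int), Dom_iterate_layout start result → Pre_iterate_layout start result → Spec_iterate_layout start result (iterate_layout start result)

-- ===== LEMMAS AND PROOFS =====

theorem pv_sum_take_succ (xs : List Int) (j : Nat) (h : j < xs.length) :
    (xs.take (j + 1)).sum = (xs.take j).sum + xs.getD j 0 := by
  rw [List.take_add_one, List.getElem?_eq_getElem h, List.getD_eq_getElem _ _ h]
  simp only [Option.toList_some, List.sum_append, List.sum_cons, List.sum_nil]
  ring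

theorem pv_sum_drop_succ (xs : List Int) (j : Nat) (h : j < xs.length) :
    (xs.drop j).sum = xs.getD j 0 + (xs.drop (j + 1)).sum := by
  conv_lhs => rw [List.drop_eq_getElem_cons h]
  rw [List.sum_cons, List.getD_eq_getElem _ _ h]

theorem pv_sum_set (xs : List Int) (n : Nat) (a : Int) (h : n < xs.length) :
    (xs.set n a).sum = xs.sum + a - xs.getD n 0 := by
  conv_lhs => rw [List.set_eq_take_cons_drop a h]
  conv_rhs =>
    rw [show xs.sum = (xs.take n ++ xs.drop n).sum by rw [List.take_append_drop],
        List.drop_eq_getElem_cons h]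
  rw [List.getD_eq_getElem _ _ h]
  simp only [List.sum_append, List.sum_cons]
  ring

theorem pv_getD_set1 (xs : List Int) (n m : Nat) (v1 : Int) (hm : m < xs.length) :
    (xs.set n v1).getD m 0 = if n = m then v1 else xs.getD m 0 := by
  rw [List.getD_eq_getElem _ _ (by simpa using hm), List.getElem_set,
    List.getD_eq_getElem _ _ hm]

theorem pv_getD_set2 (xs : List Int) (n1 n2 m : Nat) (v1 v2 : Int) (hm : m < xs.length) :
    ((xs.set n1 v1).set n2 v2).getD m 0
      = if n2 = m then v2 else if n1 = m then v1 else xs.getD m 0 := by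
  rw [List.getD_eq_getElem _ _ (by simpa using hm), List.getElem_set, List.getElem_set,
    List.getD_eq_getElem _ _ hm]

theorem pv_getD_take (xs : List Int) (m i : Nat) (h1 : i < m) (h2 : i < xs.length) :
    (xs.take m).getD i 0 = xs.getD i 0 := by
  rw [List.getD_eq_getElem _ _ (by rw [List.length_take]; omega),
    List.getD_eq_getElem _ _ h2, List.getElem_take]

-- the loop invariant: from index j on, A's fold and B's fold seeded with the four canonical
-- prefix/suffix sums at j produce the same final list and the same row
theorem pv_loop_agree (result : List Int) :
    ∀ (k j : Nat) (st : List Int) (row : String),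
      1 ≤ j → j + k + 1 = result.length → result.length ≤ st.length →
      ((PySem.List.pyRange (j : Int) ((result.length : Int) - 1) 1).foldl (pvStepA result) (st, row)) =
        (((PySem.List.pyRange (j : Int) ((result.length : Int) - 1) 1).foldl (pvStepB result)
            (st, row, (result.take j).sum, (st.take j).sum,
             (result.drop (j + 1)).sum, (st.drop (j + 1)).sum)).1,
         ((PySem.List.pyRange (j : Int) ((result.length : Int) - 1) 1).foldl (pvStepB result)
            (st, row, (result.take j).sum, (st.take j).sum,
             (result.drop (j + 1)).sum, (st.drop (j + 1)).sum)).2.1) := by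
  intro k
  induction k with
  | zero =>
    intro j st row h1 h2 h3
    rw [PySem.List.pyRange_one_eq_nil (by omega)]
    simp
  | succ k ih =>
    intro j st row h1 h2 h3
    have hlt : (j : Int) < (result.length : Int) - 1 := by omega
    have hj1 : (j : Int) + 1 = ((j + 1 : Nat) : Int) := by omega
    have hjm1 : (j : Int) - 1 = ((j - 1 : Nat) : Int) := by omega
    rw [PySem.List.pyRange_one_cons hlt, List.foldl_cons, List.foldl_cons]
    simp only [pvStepA, pvStepB]
    rw [hjm1, hj1]
    simp only [PySem.List.slice_to_natCast, PySem.List.slice_from_natCast,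
      PySem.List.pySetD_natCast, PySem.List.pyGetD_natCast]
    have hjlt : j < result.length := by omega
    have hj1lt : j + 1 < result.length := by omega
    have hjst : j < st.length := by omega
    have hj1st : j + 1 < st.length := by omega
    have hE1 : (List.take j result).sum + result.getD j 0 = (List.take (j + 1) result).sum :=
      (pv_sum_take_succ result j hjlt).symm
    have hE3 : (List.drop (j + 1) result).sum - result.getD (j + 1) 0
        = (List.drop (j + 1 + 1) result).sum := by
      rw [pv_sum_drop_succ result (j + 1) hj1lt]; ring
    by_cases hc1 : (List.take j result).sum > (List.take j st).sum
    · simp only [if_pos hc1]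
      set w : Int := st.getD j 0 - 1 with hw
      set st1 := st.set j w with hst1
      set v : Int := st1.getD (j - 1) 0 + 1 with hv
      set st2 := st1.set (j - 1) v with hst2
      have len2 : st2.length = st.length := by rw [hst2, hst1]; simp
      have hvv : v = st.getD (j - 1) 0 + 1 := by
        rw [hv, hst1, pv_getD_set1 st j (j - 1) w (by omega), if_neg (by omega)]
      have hst2j : st2.getD j 0 = st.getD j 0 - 1 := by
        rw [hst2, hst1, pv_getD_set2 st j (j - 1) j w v hjst, if_neg (by omega), if_pos rfl, hw]
      have hst2j1 : st2.getD (j + 1) 0 = st.getD (j + 1) 0 := by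
        rw [hst2, hst1, pv_getD_set2 st j (j - 1) (j + 1) w v hj1st, if_neg (by omega),
          if_neg (by omega)]
      have htakesum : (List.take j st2).sum = (List.take j st).sum + 1 := by
        rw [hst2, hst1, List.take_set, List.take_set,
          List.set_eq_of_length_le (l := st.take j) (i := j) (a := w)
            (by rw [List.length_take]; omega),
          pv_sum_set _ (j - 1) v (by rw [List.length_take]; omega),
          pv_getD_take st j (j - 1) (by omega) (by omega), hvv]
        ring
      have hdropsum : (List.drop (j + 1 + 1) st2).sum = (List.drop (j + 1 + 1) st).sum := by
        rw [hst2, List.drop_set_of_lt (by omega), hst1, List.drop_set_of_lt (by omega)]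
      have hE2 : (List.take j st).sum + 1 + st2.getD j 0 = (List.take (j + 1) st2).sum := by
        rw [pv_sum_take_succ st2 j (by omega), htakesum]
      have hE4 : (List.drop (j + 1) st).sum - st2.getD (j + 1) 0
          = (List.drop (j + 1 + 1) st2).sum := by
        rw [hdropsum, hst2j1, pv_sum_drop_succ st (j + 1) hj1st]; ring
      rw [hE1, hE2, hE3, hE4]
      exact ih (j + 1) st2 (row ++ "/") (by omega) (by omega) (by omega)
    · simp only [if_neg hc1]
      by_cases hc2 : (List.drop (j + 1) result).sum > (List.drop (j + 1) st).sum
      · simp only [if_pos hc2]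
        set w : Int := st.getD j 0 - 1 with hw
        set st1 := st.set j w with hst1
        set v : Int := st1.getD (j + 1) 0 + 1 with hv
        set st2 := st1.set (j + 1) v with hst2
        have len2 : st2.length = st.length := by rw [hst2, hst1]; simp
        have hvv : v = st.getD (j + 1) 0 + 1 := by
          rw [hv, hst1, pv_getD_set1 st j (j + 1) w (by omega), if_neg (by omega)]
        have hst2j : st2.getD j 0 = st.getD j 0 - 1 := by
          rw [hst2, hst1, pv_getD_set2 st j (j + 1) j w v hjst, if_neg (by omega), if_pos rfl, hw]
        have hst2j1 : st2.getD (j + 1) 0 = st.getD (j + 1) 0 + 1 := by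
          rw [hst2, hst1, pv_getD_set2 st j (j + 1) (j + 1) w v hj1st, if_pos rfl, hvv]
        have htakesum : (List.take j st2).sum = (List.take j st).sum := by
          rw [hst2, hst1, List.take_set, List.take_set,
            List.set_eq_of_length_le (l := st.take j) (i := j) (a := w)
              (by rw [List.length_take]; omega),
            List.set_eq_of_length_le (l := st.take j) (i := j + 1) (a := v)
              (by rw [List.length_take]; omega)]
        have hdropsum : (List.drop (j + 1 + 1) st2).sum = (List.drop (j + 1 + 1) st).sum := by
          rw [hst2, List.drop_set_of_lt (by omega), hst1, List.drop_set_of_lt (by omega)]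
        have hE2 : (List.take j st).sum + st2.getD j 0 = (List.take (j + 1) st2).sum := by
          rw [pv_sum_take_succ st2 j (by omega), htakesum]
        have hE4 : (List.drop (j + 1) st).sum + 1 - st2.getD (j + 1) 0
            = (List.drop (j + 1 + 1) st2).sum := by
          rw [hdropsum, hst2j1, pv_sum_drop_succ st (j + 1) hj1st]; ring
        rw [hE1, hE2, hE3, hE4]
        exact ih (j + 1) st2 (row ++ "\\") (by omega) (by omega) (by omega)
      · simp only [if_neg hc2]
        have hE2 : (List.take j st).sum + st.getD j 0 = (List.take (j + 1) st).sum :=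
          (pv_sum_take_succ st j hjst).symm
        have hE4 : (List.drop (j + 1) st).sum - st.getD (j + 1) 0
            = (List.drop (j + 1 + 1) st).sum := by
          rw [pv_sum_drop_succ st (j + 1) hj1st]; ring
        rw [hE1, hE2, hE3, hE4]
        exact ih (j + 1) st (row ++ ".") (by omega) (by omega) (by omega)

-- ===== VERDICT (by name: the statement is the Claim_ definition above) =====
theorem iterate_layout_spec : Claim_equal_iterate_layout := by
  intro start result hdom hpre
  show iterate_layout start result = iterate_layout_alt start result
  have hpre' : result.length ≤ start.length := hpre
  by_cases hn : 3 ≤ ((result.length : Int))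
  · have hn' : 3 ≤ result.length := by exact_mod_cast hn
    have key := pv_loop_agree result (result.length - 2) 1 start "." (le_refl 1) (by omega) hpre'
    simp only [Nat.cast_one] at key
    have s1 : PySem.List.pyGetD result 0 0 = (List.take (1 : Nat) result).sum := by
      rw [PySem.List.pyGetD_zero, show (1 : Nat) = 0 + 1 from rfl,
        pv_sum_take_succ result 0 (by omega)]
      simp
    have s2 : PySem.List.pyGetD start 0 0 = (List.take (1 : Nat) start).sum := by
      rw [PySem.List.pyGetD_zero, show (1 : Nat) = 0 + 1 from rfl,
        pv_sum_take_succ start 0 (by omega)]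
      simp
    have s3 : (PySem.List.slice result (some 2) none).sum = (List.drop (1 + 1) result).sum := by
      rw [PySem.List.slice_from _ (by norm_num), show Int.toNat 2 = 1 + 1 from rfl]
    have s4 : (PySem.List.slice start (some 2) none).sum = (List.drop (1 + 1) start).sum := by
      rw [PySem.List.slice_from _ (by norm_num), show Int.toNat 2 = 1 + 1 from rfl]
    simp only [iterate_layout, iterate_layout_alt, if_pos hn]
    rw [s1, s2, s3, s4, key]
  · simp only [iterate_layout, iterate_layout_alt, if_neg hn]
    rw [PySem.List.pyRange_one_eq_nil (by omega), List.foldl_nil]
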